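-- pv_equiv track=rewrite | github.com/YGZWQZD/LAMDA-SSL | LAMDA_SSL/Algorithm/Classification/ReMixMatch.py | interleave_offsets
-- ===== SOURCE A (Python) =====
-- def interleave_offsets(batch, num):
--     groups = [batch // (num + 1)] * (num + 1)
--     for x in range(batch - sum(groups)):
--         groups[-x - 1] += 1
--     offsets = [0]
--     for g in groups:
--         offsets.append(offsets[-1] + g)
--     assert offsets[-1] == batch
--     return offsets
-- ===== SOURCE B (Python) =====
-- def interleave_offsets(batch, num):
--     base, r = divmod(batch, num + 1)
--     k = num + 1 - r
--     return [i * base + max(0, i - k) for i in range(num + 2)]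
-- ===== Notes on version B (the rewrite author's own statement) =====
-- stated objective: simpler
-- what changed: Replaces A's two loops (distributing the remainder onto the last groups, then prefix-summing) by a single comprehension using the closed form offsets[i] = i*base + max(0, i - (num+1-r)).
-- outside the precondition, e.g. on interleave_offsets(0, -2): A returns [0], B returns []
import Mathlib
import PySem

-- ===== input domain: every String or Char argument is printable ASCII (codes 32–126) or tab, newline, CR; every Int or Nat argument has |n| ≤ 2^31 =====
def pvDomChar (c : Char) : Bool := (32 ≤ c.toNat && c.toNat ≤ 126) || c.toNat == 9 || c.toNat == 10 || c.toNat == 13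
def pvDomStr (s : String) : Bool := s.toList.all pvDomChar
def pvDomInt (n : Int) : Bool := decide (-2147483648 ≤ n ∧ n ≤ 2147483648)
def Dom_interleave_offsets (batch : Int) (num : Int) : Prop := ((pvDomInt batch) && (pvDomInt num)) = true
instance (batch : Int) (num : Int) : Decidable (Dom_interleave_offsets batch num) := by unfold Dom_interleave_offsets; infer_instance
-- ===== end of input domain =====

-- B computes the offsets with a closed form instead of A's two loops (remainder
-- distribution then prefix sums); equivalence is proved for num ≥ 0.

-- ===== PORT A =====
-- groups = [batch // (num + 1)] * (num + 1); for x in range(batch - sum(groups)): groups[-x-1] += 1;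
-- offsets = [0]; for g in groups: offsets.append(offsets[-1] + g); return offsets
-- (the assert never fails under Pre_; A's exceptions for num < 0 are excluded by Pre_)
def interleave_offsets (batch : Int) (num : Int) : List Int :=
  let groups : List Int := List.replicate (num + 1).toNat (PySem.Int.floordiv batch (num + 1))
  let groups : List Int :=
    (PySem.List.pyRange 0 (batch - groups.sum) 1).foldl
      (fun gs x => PySem.List.pySetD gs (-x - 1) (PySem.List.pyGetD gs (-x - 1) 0 + 1)) groups
  groups.foldl (fun off g => off ++ [PySem.List.pyGetD off (-1) 0 + g]) [0]

-- ===== PORT B =====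
-- base, r = divmod(batch, num + 1); k = num + 1 - r;
-- return [i * base + max(0, i - k) for i in range(num + 2)]
def interleave_offsets_alt (batch : Int) (num : Int) : List Int :=
  let base := PySem.Int.floordiv batch (num + 1)
  let r := PySem.Int.mod batch (num + 1)
  let k := num + 1 - r
  (PySem.List.pyRange 0 (num + 2) 1).map (fun i => i * base + max 0 (i - k))

-- ===== PRECONDITION & SPEC =====
-- Pre_ restricts to the natural domain num ≥ 0 (at least one group).  For num < 0 A raises
-- (ZeroDivisionError at num = -1; IndexError/AssertionError for num ≤ -2 with batch ≠ 0),
-- except at batch = 0, num ≤ -2 where A's empty group list yields the degenerate [0].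
def Pre_interleave_offsets (batch : Int) (num : Int) : Prop := 0 ≤ num
instance (batch : Int) (num : Int) : Decidable (Pre_interleave_offsets batch num) := by
  unfold Pre_interleave_offsets; infer_instance

def pvWitness_interleave_offsets : Int × Int := (10, 2)

def Spec_interleave_offsets (batch : Int) (num : Int) (out : List Int) : Prop := out = interleave_offsets_alt batch num
instance (batch : Int) (num : Int) (out : List Int) : Decidable (Spec_interleave_offsets batch num out) := by unfold Spec_interleave_offsets; infer_instance

-- ===== CLAIM (what is proved, stated in full; the proofs are below) =====
def Claim_equal_interleave_offsets : Prop := ∀ (batch : Int) (num : Int), Dom_interleave_offsets batch num → Pre_interleave_offsets batch num → Spec_interleave_offsets batch num (interleave_offsets batch num)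

-- ===== LEMMAS AND PROOFS =====

-- partial sums starting from a running last value L (the shape of A's second loop)
def pSums (L : Int) : List Int → List Int
  | [] => []
  | g :: gs => (L + g) :: pSums (L + g) gs

theorem pSums_append (L : Int) (xs ys : List Int) :
    pSums L (xs ++ ys) = pSums L xs ++ pSums ((pSums L xs).getLastD L) ys := by
  induction xs generalizing L with
  | nil => simp [pSums]
  | cons x xs ih =>
      simp only [List.cons_append, pSums, ih (L + x), List.getLastD_cons]

theorem pSums_replicate (L q : Int) (m : Nat) :
    pSums L (List.replicate m q) = (List.range m).map (fun i : Nat => L + ((i : Int) + 1) * q) := by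
  induction m generalizing L with
  | zero => simp [pSums]
  | succ m ih =>
      rw [List.replicate_succ]
      simp only [pSums, ih (L + q), List.range_succ_eq_map, List.map_cons, List.map_map]
      refine List.cons_eq_cons.mpr ⟨by push_cast; ring, ?_⟩
      apply List.map_congr_left
      intro i _
      simp only [Function.comp_apply]
      push_cast
      ring

theorem offsets_foldl (gs : List Int) (acc : List Int) (hacc : acc ≠ []) :
    gs.foldl (fun off g => off ++ [PySem.List.pyGetD off (-1) 0 + g]) acc
      = acc ++ pSums (acc.getLast hacc) gs := by
  induction gs generalizing acc with
  | nil => simp [pSums]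
  | cons g gs ih =>
      simp only [List.foldl_cons]
      rw [PySem.List.pyGetD_neg_one acc 0 hacc,
          ih (acc ++ [acc.getLast hacc + g]) (by simp)]
      simp only [List.append_assoc, List.cons_append, List.nil_append, pSums]
      congr 2
      rw [List.getLast_concat]

-- a negative-index set, as A's loop performs it
theorem pySetD_neg_natCast {α : Type} (xs : List α) (k : Nat) (v : α)
    (hk : 0 < k) (hle : k ≤ xs.length) :
    PySem.List.pySetD xs (-(k : Int)) v = xs.set (xs.length - k) v := by
  have h1 : ¬ (0 ≤ -(k : Int)) := by omega
  have h2 : -(xs.length : Int) ≤ -(k : Int) := by omega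
  simp only [PySem.List.pySetD, PySem.List.pySet?, PySem.List.pyIdx?, h1, if_false, if_pos h2,
    Option.map_some, Option.getD_some]
  congr 2
  omega

-- A's first loop: distributing r ones onto the last r groups
theorem groups_foldl (n : Nat) (q : Int) (r : Nat) (hr : r ≤ n) :
    (PySem.List.pyRange 0 (r : Int) 1).foldl
        (fun gs x => PySem.List.pySetD gs (-x - 1) (PySem.List.pyGetD gs (-x - 1) 0 + 1))
        (List.replicate n q)
      = List.replicate (n - r) q ++ List.replicate r (q + 1) := by
  induction r with
  | zero => simp [PySem.List.pyRange_one_eq_nil]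
  | succ r ih =>
      have hrn : r ≤ n := by omega
      have hcast : ((r + 1 : Nat) : Int) = (r : Int) + 1 := by push_cast; ring
      rw [hcast, PySem.List.pyRange_one_succ_right (by omega), List.foldl_append, ih hrn]
      have hlen : (List.replicate (n - r) q ++ List.replicate r (q + 1)).length = n := by
        simp; omega
      have hidx : -(r : Int) - 1 = -((r + 1 : Nat) : Int) := by push_cast; ring
      simp only [List.foldl_cons, List.foldl_nil, hidx]
      rw [PySem.List.pyGetD_neg_natCast _ (r + 1) 0 (by omega) (by omega),
          pySetD_neg_natCast _ (r + 1) _ (by omega) (by omega)]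
      simp only [hlen]
      have hget : (List.replicate (n - r) q ++ List.replicate r (q + 1))[n - (r + 1)]'(by
            simp only [List.length_append, List.length_replicate]; omega) = q := by
        rw [List.getElem_append_left (by simp only [List.length_replicate]; omega)]
        simp
      rw [hget, List.set_append_left _ _ (by simp only [List.length_replicate]; omega)]
      have hset : (List.replicate (n - r) q).set (n - (r + 1)) (q + 1)
            = List.replicate (n - (r + 1)) q ++ [q + 1] := by
        apply List.ext_getElem
        · simp; omega
        · intro i h1 h2
          simp only [List.length_set, List.length_replicate] at h1
          by_cases hi : i = n - (r + 1)
          · subst hi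
            rw [List.getElem_set_self, List.getElem_append_right (by simp only [List.length_replicate]; omega)]
            simp
          · rw [List.getElem_set_ne (by omega), List.getElem_replicate,
              List.getElem_append_left (by simp only [List.length_replicate]; omega)]
            simp
      rw [hset, List.append_assoc]
      congr 1

-- ===== VERDICT (by name: the statement is the Claim_ definition above) =====
theorem interleave_offsets_spec : Claim_equal_interleave_offsets := by
  intro batch num _ hpre
  unfold Spec_interleave_offsets interleave_offsets interleave_offsets_alt
  have hpre' : (0 : Int) ≤ num := hpre
  set q := PySem.Int.floordiv batch (num + 1) with hq
  set r := PySem.Int.mod batch (num + 1) with hr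
  have hnpos : (0 : Int) < num + 1 := by omega
  have hr0 : 0 ≤ r := PySem.Int.mod_nonneg batch hnpos
  have hrlt : r < num + 1 := PySem.Int.mod_lt batch hnpos
  have hdivmod : q * (num + 1) + r = batch := PySem.Int.floordiv_mul_add_mod batch (num + 1)
  set n : Nat := (num + 1).toNat with hn
  have hnI : (n : Int) = num + 1 := by omega
  have hsum : (List.replicate n q).sum = (n : Int) * q := by
    simp [List.sum_replicate]
  have hrem : batch - (List.replicate n q).sum = (r.toNat : Int) := by
    rw [hsum, hnI, mul_comm]; omega
  simp only [hrem]
  rw [groups_foldl n q r.toNat (by omega)]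
  rw [offsets_foldl _ [0] (by simp)]
  rw [pSums_append, pSums_replicate, pSums_replicate]
  rw [PySem.List.pyRange_one]
  simp only [List.getLast_singleton, sub_zero, List.map_map, zero_add]
  have hlast : (((List.range (n - r.toNat)).map
      (fun j : Nat => ((j : Int) + 1) * q)).getLastD 0) = ((n : Int) - r) * q := by
    rcases Nat.eq_zero_or_pos (n - r.toNat) with hz | hz
    · rw [hz]; simp; omega
    · rw [List.getLastD_eq_getLast?, List.getLast?_eq_getElem?,
        List.getElem?_eq_getElem (by simp only [List.length_map, List.length_range]; omega)]
      simp only [List.length_map, List.length_range, List.getElem_map, List.getElem_range,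
        Option.getD_some]
      have hc : ((n - r.toNat - 1 : Nat) : Int) + 1 = (n : Int) - r := by omega
      rw [hc]
  apply List.ext_getElem
  · simp only [List.length_append, List.length_map, List.length_range, List.length_cons,
      List.length_nil]
    omega
  · intro i h1 h2
    simp only [List.length_map, List.length_range] at h2
    simp only [List.getElem_map, List.getElem_range, Function.comp_apply]
    by_cases hi0 : i = 0
    · subst hi0
      rw [List.getElem_append_left (by simp)]
      simp only [List.getElem_singleton]
      rw [max_eq_left (by omega)]
      simp
    · rw [List.getElem_append_right (by simp only [List.length_cons, List.length_nil]; omega)]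
      simp only [List.length_cons, List.length_nil]
      by_cases hia : i - 1 < n - r.toNat
      · rw [List.getElem_append_left (by simp only [List.length_map, List.length_range]; omega)]
        simp only [List.getElem_map, List.getElem_range]
        rw [max_eq_left (by omega)]
        have hc : ((i - 1 : Nat) : Int) + 1 = (i : Int) := by omega
        rw [hc]
        ring
      · rw [List.getElem_append_right (by simp only [List.length_map, List.length_range]; omega)]
        simp only [List.length_map, List.length_range, List.getElem_map, List.getElem_range]
        rw [hlast]
        rw [max_eq_right (by omega)]
        have hc : ((i - 1 - (n - r.toNat) : Nat) : Int) = (i : Int) - 1 - ((n : Int) - r) := by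
          omega
        rw [hc]
        have hnr : ((n : Int) - r) = num + 1 - r := by omega
        rw [hnr]
        ring
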